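-- pv_equiv track=rewrite | github.com/acailic/agent_debugger | collector/detection.py | _detect_pattern_repeats
-- ===== SOURCE A (Python) =====
-- def _detect_pattern_repeats(sequence: list[tuple[str, str]], pattern_len: int) -> tuple[int, list[int]] | None:
--     """Detect if a pattern of given length repeats in the sequence.
--
--     Returns:
--         Tuple of (repeat_count, matched_indices) if pattern found, None otherwise
--     """
--     if len(sequence) < pattern_len * 2:
--         return None
--
--     pattern = sequence[:pattern_len]
--     repeats = 1
--     matched_indices: list[int] = list(range(pattern_len))
--
--     for i in range(pattern_len, len(sequence) - pattern_len + 1, pattern_len):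
--         if sequence[i : i + pattern_len] == pattern:
--             repeats += 1
--             matched_indices.extend(range(i, i + pattern_len))
--
--     if repeats >= 2:
--         return repeats, matched_indices
--
--     return None
-- ===== SOURCE B (Python) =====
-- def _detect_pattern_repeats(sequence: list[tuple[str, str]], pattern_len: int) -> tuple[int, list[int]] | None:
--     """Chunk-based: split the sequence into full blocks of pattern_len, count blocks
--     equal to the first one, then derive the matched indices from the block numbers."""
--     if pattern_len < 1 or len(sequence) < pattern_len * 2:
--         return None
--     blocks = []
--     rest = sequence
--     while len(rest) >= pattern_len:
--         blocks.append(rest[:pattern_len])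
--         rest = rest[pattern_len:]
--     pattern = blocks[0]
--     repeats = blocks.count(pattern)
--     if repeats < 2:
--         return None
--     matched_indices = [b * pattern_len + j
--                        for b, blk in enumerate(blocks) if blk == pattern
--                        for j in range(pattern_len)]
--     return repeats, matched_indices
-- ===== Notes on version B (the rewrite author's own statement) =====
-- stated objective: alternative
-- what changed: Replaces A's strided-index accumulator loop (first block seeded as a match) by a chunking decomposition: peel the sequence into a list of full blocks, take blocks[0] as the pattern, get the repeat count with blocks.count, and derive matched indices from enumerate(blocks).
import Mathlib
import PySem

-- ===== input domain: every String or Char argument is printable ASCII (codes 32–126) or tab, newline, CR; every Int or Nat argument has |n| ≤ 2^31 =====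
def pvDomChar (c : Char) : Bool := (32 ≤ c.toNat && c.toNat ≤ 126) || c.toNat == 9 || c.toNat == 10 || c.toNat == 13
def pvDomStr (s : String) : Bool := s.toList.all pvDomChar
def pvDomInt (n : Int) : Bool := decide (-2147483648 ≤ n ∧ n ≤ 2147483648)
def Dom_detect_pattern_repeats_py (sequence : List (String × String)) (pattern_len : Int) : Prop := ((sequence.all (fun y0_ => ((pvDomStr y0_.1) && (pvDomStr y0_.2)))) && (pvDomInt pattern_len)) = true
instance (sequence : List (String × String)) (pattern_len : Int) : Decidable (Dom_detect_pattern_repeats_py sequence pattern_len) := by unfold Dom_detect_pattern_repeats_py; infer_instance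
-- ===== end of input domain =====

-- B replaces A's strided-index accumulator loop by chunking the sequence into blocks,
-- counting blocks equal to the first with .count, and deriving indices from enumerate; objective: simpler.

-- ===== PORT A =====
def detect_pattern_repeats_py (sequence : List (String × String)) (pattern_len : Int) : Option (Int × List Int) :=
  if (sequence.length : Int) < pattern_len * 2 then none
  else
    let pattern := PySem.List.slice sequence none (some pattern_len)
    let st := (PySem.List.pyRange pattern_len ((sequence.length : Int) - pattern_len + 1) pattern_len).foldl
      (fun (st : Int × List Int) i =>
        if PySem.List.slice sequence (some i) (some (i + pattern_len)) == pattern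
        then (st.1 + 1, st.2 ++ PySem.List.pyRange i (i + pattern_len) 1)
        else st)
      (1, PySem.List.pyRange 0 pattern_len 1)
    if st.1 ≥ 2 then some st else none

-- ===== PORT B =====
-- B's while-loop that peels full blocks of k elements off the front of the list.
-- The '0 < k' conjunct is a totality guard only: B's code reaches the loop only with pattern_len ≥ 1.
def pvPeelBlocks {α : Type} (k : Nat) (l : List α) : List (List α) :=
  if h : 0 < k ∧ k ≤ l.length then
    l.take k :: pvPeelBlocks k (l.drop k)
  else []
termination_by l.length
decreasing_by simp; omega

def detect_pattern_repeats_py_alt (sequence : List (String × String)) (pattern_len : Int) : Option (Int × List Int) :=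
  if pattern_len < 1 ∨ (sequence.length : Int) < pattern_len * 2 then none
  else
    -- rest[:pattern_len] / rest[pattern_len:] with pattern_len ≥ 1: take/drop of pattern_len.toNat is exact here
    let blocks := pvPeelBlocks pattern_len.toNat sequence
    let pattern := blocks.headD []   -- blocks[0]; blocks is nonempty under the guard, so headD is exact here
    let repeats : Int := (PySem.List.count blocks pattern : Int)
    if repeats < 2 then none
    else
      some (repeats,
        (PySem.List.enumerate blocks 0).flatMap
          (fun bp => if bp.2 == pattern
                     then (PySem.List.pyRange 0 pattern_len 1).map (fun j => bp.1 * pattern_len + j)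
                     else []))

-- ===== PRECONDITION & SPEC =====
-- Pre_ excludes only pattern_len = 0, where Python A's range(..., step=0) raises ValueError.
def Pre_detect_pattern_repeats_py (sequence : List (String × String)) (pattern_len : Int) : Prop :=
  pattern_len ≠ 0
instance (sequence : List (String × String)) (pattern_len : Int) : Decidable (Pre_detect_pattern_repeats_py sequence pattern_len) := by unfold Pre_detect_pattern_repeats_py; infer_instance

def pvWitness_detect_pattern_repeats_py : (List (String × String)) × Int := ([("a", "b"), ("a", "b")], 1)

def Spec_detect_pattern_repeats_py (sequence : List (String × String)) (pattern_len : Int) (out : Option (Int × List Int)) : Prop := out = detect_pattern_repeats_py_alt sequence pattern_len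
instance (sequence : List (String × String)) (pattern_len : Int) (out : Option (Int × List Int)) : Decidable (Spec_detect_pattern_repeats_py sequence pattern_len out) := by unfold Spec_detect_pattern_repeats_py; infer_instance

-- ===== CLAIM (what is proved, stated in full; the proofs are below) =====
def Claim_equal_detect_pattern_repeats_py : Prop := ∀ (sequence : List (String × String)) (pattern_len : Int), Dom_detect_pattern_repeats_py sequence pattern_len → Pre_detect_pattern_repeats_py sequence pattern_len → Spec_detect_pattern_repeats_py sequence pattern_len (detect_pattern_repeats_py sequence pattern_len)


-- ===== LEMMAS AND PROOFS =====

-- A's accumulator loop characterised as count + flatMap.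
theorem pv_fold (p : Int → Bool) (g : Int → List Int) :
    ∀ (l : List Int) (r : Int) (acc : List Int),
      l.foldl (fun (st : Int × List Int) i => if p i then (st.1 + 1, st.2 ++ g i) else st) (r, acc)
      = (r + (l.countP p : Int), acc ++ l.flatMap (fun i => if p i then g i else [])) := by
  intro l
  induction l with
  | nil => intro r acc; simp
  | cons hd tl ih =>
    intro r acc
    by_cases h : p hd
    · simp only [List.foldl_cons, h, if_true, ih, List.countP_cons, List.flatMap_cons]
      simp only [Prod.mk.injEq]
      exact ⟨by push_cast; ring, by simp [List.append_assoc]⟩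
    · simp only [List.foldl_cons, h, Bool.false_eq_true, if_false, ih, List.countP_cons,
        List.flatMap_cons]
      simp [h]

-- B's peeling loop produces exactly the full k-blocks, as drop/take slices.
theorem pv_peel_eq {α : Type} (k : Nat) (hk : 0 < k) :
    ∀ (N : Nat) (l : List α), l.length ≤ N →
      pvPeelBlocks k l = (List.range (l.length / k)).map (fun b => (l.drop (b * k)).take k) := by
  intro N
  induction N with
  | zero =>
    intro l hl
    have h0 : l.length = 0 := by omega
    rw [pvPeelBlocks]
    rw [dif_neg (by omega)]
    rw [Nat.div_eq_of_lt (by omega)]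
    simp
  | succ N ih =>
    intro l hl
    rw [pvPeelBlocks]
    by_cases h : k ≤ l.length
    · rw [dif_pos ⟨hk, h⟩, ih (l.drop k) (by simp; omega)]
      rw [List.length_drop]
      have hm : l.length / k = (l.length - k) / k + 1 := Nat.div_eq_sub_div hk h
      rw [hm, List.range_succ_eq_map]
      simp only [List.map_cons, List.map_map, Nat.zero_mul, List.drop_zero]
      congr 1
      apply List.map_congr_left
      intro b _
      simp only [Function.comp, List.drop_drop]
      congr 2
      simp [Nat.succ_mul]
      omega
    · rw [dif_neg (by omega), Nat.div_eq_of_lt (by omega)]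
      simp
  
-- enumerate of a mapped list.
theorem pv_enum_map {α β : Type} (f : α → β) :
    ∀ (l : List α) (s : Int),
      PySem.List.enumerate (l.map f) s = (PySem.List.enumerate l s).map (fun q => (q.1, f q.2)) := by
  intro l
  induction l with
  | nil => intro s; simp [PySem.List.enumerate_nil]
  | cons hd tl ih => intro s; simp [PySem.List.enumerate_cons, ih]

-- enumerate of List.range pairs each entry with its own value.
theorem pv_enum_range (m : Nat) :
    ∀ (s : Int), PySem.List.enumerate (List.range m) s = (List.range m).map (fun (b : Nat) => (s + (b : Int), b)) := by
  induction m with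
  | zero => intro s; simp [PySem.List.enumerate_nil]
  | succ m ih =>
    intro s
    rw [List.range_succ, PySem.List.enumerate_append, ih, List.map_append]
    simp [PySem.List.enumerate_cons]

-- A's offset range, as (b+1)·k for block numbers b.
theorem pv_rangeA (K n : Nat) (hK : 1 ≤ K) (hn : 2 * K ≤ n) :
    PySem.List.pyRange (K : Int) ((n : Int) - K + 1) (K : Int)
      = (List.range (n / K - 1)).map (fun (b : Nat) => ((K : Int) + (K : Int) * (b : Int))) := by
  rw [PySem.List.pyRange_of_pos _ _ (by exact_mod_cast hK : (0 : Int) < (K : Int))]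
  rw [if_pos (by omega : ((K : Int)) < (n : Int) - K + 1)]
  have e1 : (n : Int) - K + 1 - K + K - 1 = ((n - K : Nat) : Int) := by omega
  have hcount : (((n : Int) - K + 1 - K + K - 1) / (K : Int)).toNat = n / K - 1 := by
    have h := Nat.div_eq_sub_div hK (by omega : K ≤ n)
    have e2 : ((n - K : Nat) : Int) / ((K : Nat) : Int) = (((n - K) / K : Nat) : Int) :=
      (Int.natCast_div _ _).symm
    rw [e1, e2, Int.toNat_natCast, h, Nat.add_sub_cancel]
  rw [hcount]

-- main equality on Pre_
theorem pv_main (sequence : List (String × String)) (pattern_len : Int)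
    (hpre : pattern_len ≠ 0) :
    detect_pattern_repeats_py sequence pattern_len = detect_pattern_repeats_py_alt sequence pattern_len := by
  unfold detect_pattern_repeats_py detect_pattern_repeats_py_alt
  rcases lt_or_gt_of_ne hpre with hneg | hpos
  · -- negative pattern_len: A's loop range is empty, repeats stays 1; B's guard fires
    rw [if_neg (by omega : ¬ ((sequence.length : Int) < pattern_len * 2)),
        if_pos (Or.inl (by omega : pattern_len < 1))]
    have e1 : PySem.List.pyRange pattern_len ((sequence.length : Int) - pattern_len + 1) pattern_len = [] := by
      unfold PySem.List.pyRange
      rw [if_neg hpre, if_neg (by omega), if_neg (by omega)]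
      simp
    rw [e1]
    norm_num
  · -- pattern_len ≥ 1
    obtain ⟨K, hK⟩ : ∃ K : Nat, pattern_len = (K : Int) := ⟨pattern_len.toNat, by omega⟩
    subst hK
    have hK1 : 1 ≤ K := by omega
    by_cases hg : ((sequence.length : Int)) < (K : Int) * 2
    · rw [if_pos hg, if_pos (Or.inr hg)]
    · rw [if_neg hg, if_neg (by omega : ¬ (((K : Int)) < 1 ∨ ((sequence.length : Int)) < (K : Int) * 2))]
      simp only [ge_iff_le]
      have hn2 : 2 * K ≤ sequence.length := by omega
      obtain ⟨t, ht⟩ : ∃ t, sequence.length / K = t + 1 := by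
        have h2 : 2 ≤ sequence.length / K := (Nat.le_div_iff_mul_le (by omega)).2 (by omega)
        exact ⟨sequence.length / K - 1, by omega⟩
      -- normalize A's pattern and B's blocks
      rw [PySem.List.slice_to_natCast]
      rw [show ((K : Int)).toNat = K from Int.toNat_natCast K]
      rw [pv_peel_eq K (by omega) sequence.length sequence le_rfl]
      set pat := sequence.take K with hpat
      set chunk : Nat → List (String × String) := fun b => (sequence.drop (b * K)).take K with hchunk
      rw [pv_fold (fun i => PySem.List.slice sequence (some i) (some (i + (K : Int))) == pat)
            (fun i => PySem.List.pyRange i (i + (K : Int)) 1)]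
      rw [pv_rangeA K sequence.length hK1 hn2]
      rw [ht, Nat.add_sub_cancel, List.range_succ_eq_map]
      simp only [List.map_cons, List.map_map]
      have hchunk0 : chunk 0 = pat := by simp [hchunk, hpat]
      rw [List.headD_cons, hchunk0]
      -- count on B side
      rw [PySem.List.count_eq, List.count_cons]
      rw [show (pat == pat) = true from beq_self_eq_true pat]
      rw [if_pos rfl, List.count_eq_countP]
      rw [List.countP_map, List.countP_map]
      -- the two per-block predicates agree
      have hpred : ∀ b, b ∈ List.range t →
          ((fun i => PySem.List.slice sequence (some i) (some (i + (K : Int))) == pat) ∘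
            fun (b : Nat) => (K : Int) + (K : Int) * (b : Int)) b = ((fun x => x == pat) ∘ chunk ∘ Nat.succ) b := by
        intro b _
        simp only [Function.comp, hchunk]
        have hcast : ((K : Int) + (K : Int) * ((b : Nat) : Int)) = ((K + K * b : Nat) : Int) := by
          push_cast; ring
        rw [hcast, PySem.List.slice_natCast_add,
          show K + K * b = Nat.succ b * K from by rw [Nat.succ_mul]; ring]
      rw [List.countP_congr (fun b hb => by rw [hpred b hb])]
      -- indices on B side: enumerate, then flatMap over block numbers
      rw [PySem.List.enumerate_cons, List.flatMap_cons]
      rw [show (pat == pat) = true from beq_self_eq_true pat, if_pos rfl]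
      rw [pv_enum_map, pv_enum_range, List.map_map, List.flatMap_map, List.flatMap_map]
      simp only [Function.comp]
      -- per-block index lists coincide
      have hbranch : ∀ a : Nat,
          PySem.List.pyRange ((K : Int) + (K : Int) * (a : Int)) ((K : Int) + (K : Int) * (a : Int) + (K : Int)) 1
          = List.map (fun j => ((0 : Int) + 1 + (a : Int)) * (K : Int) + j) (PySem.List.pyRange 0 (K : Int) 1) := by
        intro a
        rw [PySem.List.pyRange_one, PySem.List.pyRange_one, List.map_map]
        simp only [add_sub_cancel_left, sub_zero]
        rw [show ((K : Int)).toNat = K from Int.toNat_natCast K]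
        apply List.map_congr_left
        intro k _
        simp only [Function.comp]
        push_cast
        ring
      have htail : ∀ a ∈ List.range t,
          (if (PySem.List.slice sequence (some ((K : Int) + (K : Int) * (a : Int)))
                (some ((K : Int) + (K : Int) * (a : Int) + (K : Int))) == pat) = true
             then PySem.List.pyRange ((K : Int) + (K : Int) * (a : Int)) ((K : Int) + (K : Int) * (a : Int) + (K : Int)) 1
             else [])
          = (if (chunk a.succ == pat) = true
             then List.map (fun j => ((0 : Int) + 1 + (a : Int)) * (K : Int) + j) (PySem.List.pyRange 0 (K : Int) 1)
             else []) := by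
        intro a ha
        have hc := hpred a ha
        simp only [Function.comp] at hc
        rw [hc, hbranch a]
      set c := List.countP ((fun x => x == pat) ∘ chunk ∘ Nat.succ) (List.range t) with hcdef
      by_cases h2 : 1 ≤ c
      · rw [if_pos (by omega : (2 : Int) ≤ 1 + (c : Int)),
            if_neg (by omega : ¬ (((c + 1 : Nat) : Int) < 2))]
        refine congrArg some (Prod.ext ?_ ?_)
        · push_cast; ring
        · refine congrArg₂ (· ++ ·) ?_ ?_
          · simp
          · exact List.flatMap_congr htail
      · rw [if_neg (by omega : ¬ ((2 : Int) ≤ 1 + (c : Int))),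
            if_pos (by omega : (((c + 1 : Nat) : Int) < 2))]
-- ===== VERDICT (by name: the statement is the Claim_ definition above) =====
theorem detect_pattern_repeats_py_spec : Claim_equal_detect_pattern_repeats_py := by
  intro sequence pattern_len _ hpre
  unfold Spec_detect_pattern_repeats_py
  exact pv_main sequence pattern_len hpre
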